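-- pv_equiv track=rewrite | github.com/Agentic-Environmental-Engineering/GymVerse | gem/gem/envs/RLVE/combination_odd_subsequence_counting_env.py | _compute_reference_answer
-- ===== SOURCE A (Python) =====
-- from typing import Any, Optional, SupportsFloat, Tuple, List, Dict
--
-- def _compute_reference_answer(A: List[int]) -> int:
--     """Compute the number of valid subsequences of length >= 2 using DP over submask relations."""
--     N = len(A)
--     max_val = max(A)
--     # T[v] = index in A if v exists, else -1
--     T = [-1] * (max_val + 1)
--     for i, v in enumerate(A):
--         T[v] = i
--
--     # f[i] = number of submask-respecting subsequences starting at position i (including the length-1 subsequence [A[i]])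
--     f = [0] * N
--     ans = 0
--
--     # DP from right to left
--     for i in range(N - 1, -1, -1):
--         mask = A[i]
--         cnt = 1  # count the subsequence [A[i]] itself
--         # enumerate all non-zero proper submasks j of mask
--         j = mask & (mask - 1)
--         while j:
--             if j <= max_val:
--                 idx = T[j]
--                 # extend subsequences only if that submask value appears later in the sequence
--                 if idx > i:
--                     cnt += f[idx]
--             # move to next submask
--             j = mask & (j - 1)
--         f[i] = cnt
--         ans += cnt
--
--     # subtract the single-element subsequences to count only those of length >= 2
--     ans -= N
--     return ans
-- ===== SOURCE B (Python) =====
-- def _compute_reference_answer(A):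
--     """Top-down memoized recursion over the position DAG (instead of A's
--     right-to-left array DP): f(i) = 1 + sum of f(T[j]) over nonzero proper
--     submasks j of A[i] whose last occurrence T[j] lies strictly after i."""
--     T = {}
--     for i, v in enumerate(A):
--         T[v] = i  # last occurrence wins
--
--     def submasks(mask):
--         out = []
--         j = mask & (mask - 1)
--         while j:
--             out.append(j)
--             j = mask & (j - 1)
--         return out
--
--     memo = {}
--
--     def f(i):
--         if i in memo:
--             return memo[i]
--         total = 1
--         for j in submasks(A[i]):
--             idx = T.get(j, -1)
--             if idx > i:
--                 total += f(idx)
--         memo[i] = total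
--         return total
--
--     return sum(f(i) for i in range(len(A))) - len(A)
-- ===== Notes on version B (the rewrite author's own statement) =====
-- stated objective: alternative
-- what changed: B replaces A's bottom-up right-to-left array DP (f filled by descending index with an inlined submask while-loop) with top-down memoized recursion over the position DAG: a submasks() helper lists the proper submasks, f(i) recurses into the last occurrence T[j] of each submask appearing after i, and the answer is sum(f(i) for i in range(N)) - N.
-- outside the precondition, e.g. on _compute_reference_answer([]): A raises ValueError, B returns 0
import Mathlib
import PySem

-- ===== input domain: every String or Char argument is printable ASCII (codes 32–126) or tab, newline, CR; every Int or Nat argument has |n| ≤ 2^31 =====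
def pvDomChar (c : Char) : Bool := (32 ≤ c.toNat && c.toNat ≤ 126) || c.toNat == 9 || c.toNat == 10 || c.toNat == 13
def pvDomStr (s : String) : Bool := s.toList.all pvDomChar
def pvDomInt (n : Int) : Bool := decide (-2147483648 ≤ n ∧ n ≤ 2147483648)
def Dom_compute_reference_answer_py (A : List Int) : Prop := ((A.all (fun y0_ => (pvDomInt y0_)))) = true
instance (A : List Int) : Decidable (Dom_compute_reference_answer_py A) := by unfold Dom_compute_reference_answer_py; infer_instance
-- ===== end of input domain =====

-- B replaces A's bottom-up right-to-left array DP with top-down memoized recursion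
-- over the position DAG (objective: alternative, same cost).

-- ===== PORT A =====
-- A's inner `while j:` loop: `if j <= max_val: idx = T[j]; if idx > i: cnt += f[idx]; j = mask & (j-1)`.
-- Fuel-bounded transcription; for the nonnegative masks admitted by Pre_ the fuel always suffices
-- (j strictly decreases), while Python's loop never terminates on a negative mask (outside Pre_).
def pvInnerA (mask maxVal i : Int) (T f : List Int) : Nat → Int → Int → Int
  | 0, cnt, _ => cnt
  | fuel+1, cnt, j =>
    if 0 < j then
      let cnt' := if j ≤ maxVal then
          (let idx := PySem.List.pyGetD T j (-1)
           if i < idx then cnt + PySem.List.pyGetD f idx 0 else cnt)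
        else cnt
      pvInnerA mask maxVal i T f fuel cnt' (PySem.Int.band mask (j - 1))
    else cnt

-- `T = [-1] * (max_val + 1); for i, v in enumerate(A): T[v] = i`
def pvBuildT (A : List Int) (maxVal : Int) : List Int :=
  (PySem.List.enumerate A 0).foldl (fun T p => PySem.List.pySetD T p.2 p.1)
    (List.replicate (maxVal + 1).toNat (-1))

-- one iteration of A's `for i in range(N-1, -1, -1)` loop; state = (f, ans)
def pvStepA (A : List Int) (maxVal : Int) (T : List Int) (st : List Int × Int) (i : Int) :
    List Int × Int :=
  let mask := PySem.List.pyGetD A i 0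
  let j0 := PySem.Int.band mask (mask - 1)
  let cnt := pvInnerA mask maxVal i T st.1 (j0.toNat + 1) 1 j0
  (PySem.List.pySetD st.1 i cnt, st.2 + cnt)

def compute_reference_answer_py (A : List Int) : Int :=
  match PySem.List.max? A (fun x => x) with
  | none => 0  -- Python: max([]) raises ValueError; excluded by Pre_
  | some maxVal =>
    let N : Int := PySem.List.len A
    let T := pvBuildT A maxVal
    let st := (PySem.List.pyRange (N - 1) (-1) (-1)).foldl (pvStepA A maxVal T)
      (List.replicate A.length 0, 0)
    st.2 - N

-- ===== PORT B =====
-- `T = {}; for i, v in enumerate(A): T[v] = i`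
def pvBuildTD (A : List Int) : PySem.Dict Int Int :=
  (PySem.List.enumerate A 0).foldl (fun T p => T.insert p.2 p.1) PySem.Dict.empty

-- B's `submasks(mask)` while-loop, fuel-bounded (same fuel remark as A's inner loop:
-- sufficient for the nonnegative masks admitted by Pre_, where j strictly decreases).
def pvSubsGo (mask : Int) : Nat → Int → List Int
  | 0, _ => []
  | fuel+1, j => if 0 < j then j :: pvSubsGo mask fuel (PySem.Int.band mask (j - 1)) else []

def pvSubmasks (mask : Int) : List Int :=
  let j0 := PySem.Int.band mask (mask - 1)
  pvSubsGo mask (j0.toNat + 1) j0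

-- B's memoized `f(i)`, threading the memo dict; fuel-bounded transcription of the
-- recursion (fuel len(A) suffices: every recursive call strictly increases the position).
def pvFB (A : List Int) (T : PySem.Dict Int Int) : Nat → PySem.Dict Int Int → Int → PySem.Dict Int Int × Int
  | 0, memo, _ => (memo, 0)
  | fuel+1, memo, i =>
    match memo.get? i with
    | some c => (memo, c)
    | none =>
      let st := (pvSubmasks (PySem.List.pyGetD A i 0)).foldl
        (fun (st : PySem.Dict Int Int × Int) j =>
          let idx := T.getD j (-1)
          if i < idx then
            let p := pvFB A T fuel st.1 idx
            (p.1, st.2 + p.2)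
          else st) (memo, 1)
      (st.1.insert i st.2, st.2)

def compute_reference_answer_py_alt (A : List Int) : Int :=
  let T := pvBuildTD A
  let st := (PySem.List.pyRange 0 (PySem.List.len A) 1).foldl
    (fun (st : PySem.Dict Int Int × Int) i =>
      let p := pvFB A T A.length st.1 i
      (p.1, st.2 + p.2)) (PySem.Dict.empty, 0)
  st.2 - PySem.List.len A

-- ===== PRECONDITION & SPEC =====
-- Pre_ excludes exactly the inputs on which Python A does not return normally: the empty list
-- (max([]) raises ValueError) and lists containing a negative value (A either raises IndexError
-- while building or reading T, or its submask while-loop never terminates on a negative mask).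
def Pre_compute_reference_answer_py (A : List Int) : Prop := A ≠ [] ∧ ∀ v ∈ A, 0 ≤ v
instance (A : List Int) : Decidable (Pre_compute_reference_answer_py A) := by
  unfold Pre_compute_reference_answer_py; infer_instance

def pvWitness_compute_reference_answer_py : List Int := [5, 3, 1, 7]

def Spec_compute_reference_answer_py (A : List Int) (out : Int) : Prop := out = compute_reference_answer_py_alt A
instance (A : List Int) (out : Int) : Decidable (Spec_compute_reference_answer_py A out) := by unfold Spec_compute_reference_answer_py; infer_instance

-- ===== CLAIM (what is proved, stated in full; the proofs are below) =====
def Claim_equal_compute_reference_answer_py : Prop := ∀ (A : List Int), Dom_compute_reference_answer_py A → Pre_compute_reference_answer_py A → Spec_compute_reference_answer_py A (compute_reference_answer_py A)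

-- ===== LEMMAS AND PROOFS =====

-- abbreviations used throughout the proofs: A's lookup `T[v]` (with -1 as "absent")
-- and B's lookup `T.get(v, -1)`
def pvTGet (T : List Int) (v : Int) : Int := PySem.List.pyGetD T v (-1)
def pvIdx (A : List Int) (v : Int) : Int := (pvBuildTD A).getD v (-1)

-- the common recurrence both programs compute, as a fuel-indexed function of the position
def pvPhi (A : List Int) : Nat → Int → Int
  | 0, _ => 0
  | fuel+1, i => 1 + ((pvSubmasks (PySem.List.pyGetD A i 0)).map (fun j =>
      if i < pvIdx A j then pvPhi A fuel (pvIdx A j) else 0)).sum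

-- the value both programs attach to position k
def pvF (A : List Int) (k : Nat) : Int := pvPhi A (A.length - k) (k : Int)

-- the partial sums of pvF from position i upward
def pvS (A : List Int) (i : Nat) : Int := (((List.range A.length).drop i).map (pvF A)).sum

-- the memo-dict invariant of B's recursion
def pvMemoInv (A : List Int) (memo : PySem.Dict Int Int) : Prop :=
  ∀ (k c : Int), memo.get? k = some c → 0 ≤ k ∧ k < (A.length : Int) ∧ c = pvF A k.toNat

-- the T-building foldl preserves the length of the table
lemma pvBuildT_aux_length (l : List (Int × Int)) (T0 : List Int) :
    (l.foldl (fun T p => PySem.List.pySetD T p.2 p.1) T0).length = T0.length := by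
  induction l generalizing T0 with
  | nil => rfl
  | cons p l ih => simp [List.foldl_cons, ih, PySem.List.length_pySetD]

lemma pvBuildT_length (A : List Int) (M : Int) :
    (pvBuildT A M).length = (M + 1).toNat := by
  simp [pvBuildT, pvBuildT_aux_length]

lemma pvBuildT_append (A : List Int) (x M : Int) :
    pvBuildT (A ++ [x]) M = PySem.List.pySetD (pvBuildT A M) x (A.length : Int) := by
  simp [pvBuildT, PySem.List.enumerate_append, PySem.List.enumerate_cons,
    PySem.List.enumerate_nil, List.foldl_append]

lemma pvBuildTD_append (A : List Int) (x : Int) :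
    pvBuildTD (A ++ [x]) = (pvBuildTD A).insert x (A.length : Int) := by
  simp [pvBuildTD, PySem.List.enumerate_append, PySem.List.enumerate_cons,
    PySem.List.enumerate_nil, List.foldl_append]

-- B's dict T stores only valid indices of values occurring in A
lemma pvTD_spec : ∀ (A : List Int) (v k : Int),
    (pvBuildTD A).get? v = some k → 0 ≤ k ∧ k < (A.length : Int) ∧ v ∈ A := by
  intro A
  induction A using List.reverseRecOn with
  | nil => intro v k h; simp [pvBuildTD, PySem.List.enumerate_nil, PySem.Dict.get?_empty] at h
  | append_singleton A x ih =>
    intro v k h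
    rw [pvBuildTD_append, PySem.Dict.get?_insert] at h
    by_cases hv : v = x
    · rw [if_pos hv] at h
      obtain rfl : (A.length : Int) = k := by injection h
      refine ⟨by positivity, ?_, by simp [hv]⟩
      simp only [List.length_append, List.length_cons, List.length_nil]
      push_cast
      omega
    · rw [if_neg hv] at h
      obtain ⟨h1, h2, h3⟩ := ih v k h
      refine ⟨h1, ?_, by simp [h3]⟩
      simp only [List.length_append, List.length_cons, List.length_nil]
      push_cast
      omega

-- bounds for B's guarded lookup
lemma pvIdx_bounds (A : List Int) (v i : Int) (hi : 0 ≤ i) (h : i < pvIdx A v) :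
    0 ≤ pvIdx A v ∧ pvIdx A v < (A.length : Int) := by
  unfold pvIdx at *
  rw [PySem.Dict.getD_eq_get?_getD] at *
  cases hg : (pvBuildTD A).get? v with
  | none => rw [hg] at h; simp at h; omega
  | some k =>
    obtain ⟨h1, h2, _⟩ := pvTD_spec A v k hg
    simpa using ⟨h1, h2⟩

-- a value above the maximum is not in the dict
lemma pvIdx_of_gt_max (A : List Int) (M v : Int) (hall : ∀ w ∈ A, 0 ≤ w ∧ w ≤ M)
    (hv : ¬ v ≤ M) : pvIdx A v = -1 := by
  unfold pvIdx
  rw [PySem.Dict.getD_eq_get?_getD]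
  cases hg : (pvBuildTD A).get? v with
  | none => rfl
  | some k => exact absurd (hall v (pvTD_spec A v k hg).2.2).2 hv

-- A's list table and B's dict agree on every admitted value
lemma pvT_agree (M : Int) : ∀ (A : List Int), (∀ v ∈ A, 0 ≤ v ∧ v ≤ M) →
    ∀ v : Int, 0 ≤ v → v ≤ M → pvTGet (pvBuildT A M) v = pvIdx A v := by
  intro A
  induction A using List.reverseRecOn with
  | nil =>
    intro _ v hv0 hvM
    have hbase : pvTGet (pvBuildT [] M) v = -1 := by
      simp [pvTGet, pvBuildT, PySem.List.enumerate_nil,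
        PySem.List.pyGetD_of_nonneg _ _ hv0, List.getD_eq_getElem?_getD]
    rw [hbase]
    simp [pvIdx, pvBuildTD, PySem.List.enumerate_nil, PySem.Dict.getD_empty]
  | append_singleton A x ih =>
    intro hall v hv0 hvM
    have hallA : ∀ v ∈ A, 0 ≤ v ∧ v ≤ M := fun v hv => hall v (by simp [hv])
    have hx := hall x (by simp)
    rw [pvBuildT_append]
    have hset : PySem.List.pySetD (pvBuildT A M) x (A.length : Int)
        = (pvBuildT A M).set x.toNat (A.length : Int) :=
      PySem.List.pySetD_of_nonneg _ _ hx.1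
    have hd : pvIdx (A ++ [x]) v = if v = x then (A.length : Int) else pvIdx A v := by
      simp [pvIdx, pvBuildTD_append, PySem.Dict.getD_insert]
    rw [hset, hd]
    by_cases hvx : v = x
    · subst hvx
      have hlt : v.toNat < (pvBuildT A M).length := by
        rw [pvBuildT_length]; omega
      rw [if_pos rfl]
      simp [pvTGet, PySem.List.pyGetD_of_nonneg _ _ hv0, List.getD_eq_getElem?_getD,
        List.getElem?_set_self hlt]
    · have hne : x.toNat ≠ v.toNat := by omega
      rw [if_neg hvx, ← ih hallA v hv0 hvM]
      simp [pvTGet, PySem.List.pyGetD_of_nonneg _ _ hv0, List.getD_eq_getElem?_getD,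
        List.getElem?_set_ne hne]

-- every element produced by the submask loop is positive
lemma pvSubsGo_pos (mask : Int) : ∀ (fuel : Nat) (j x : Int),
    x ∈ pvSubsGo mask fuel j → 0 < x := by
  intro fuel
  induction fuel with
  | zero => intro j x h; simp [pvSubsGo] at h
  | succ n ih =>
    intro j x h
    by_cases hj : 0 < j
    · rw [pvSubsGo, if_pos hj] at h
      rcases List.mem_cons.1 h with rfl | h'
      · exact hj
      · exact ih _ _ h'
    · rw [pvSubsGo, if_neg hj] at h; simp at h

-- pvPhi does not depend on the fuel once the fuel covers the remaining positions
lemma pvPhi_plateau (A : List Int) : ∀ (f1 f2 : Nat) (i : Int), 0 ≤ i →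
    i < (A.length : Int) → (A.length : Int) - i ≤ f1 → (A.length : Int) - i ≤ f2 →
    pvPhi A f1 i = pvPhi A f2 i := by
  intro f1
  induction f1 with
  | zero => intro f2 i _ h1 h2 _; omega
  | succ n ih =>
    intro f2 i hi0 hiN hf1 hf2
    cases f2 with
    | zero => omega
    | succ m =>
      simp only [pvPhi]
      congr 1
      refine congrArg List.sum (List.map_congr_left ?_)
      intro j _
      by_cases hlt : i < pvIdx A j
      · obtain ⟨h0, hN⟩ := pvIdx_bounds A j i hi0 hlt
        rw [if_pos hlt, if_pos hlt]
        exact ih m (pvIdx A j) h0 hN (by omega) (by omega)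
      · rw [if_neg hlt, if_neg hlt]

-- the recurrence satisfied by pvF at every valid position
lemma pvF_rec (A : List Int) (k : Nat) (hk : k < A.length) :
    pvF A k = 1 + ((pvSubmasks (PySem.List.pyGetD A (k : Int) 0)).map (fun j =>
      if (k : Int) < pvIdx A j then pvF A (pvIdx A j).toNat else 0)).sum := by
  unfold pvF
  have hfe : A.length - k = (A.length - k - 1) + 1 := by omega
  rw [hfe]
  simp only [pvPhi]
  congr 1
  refine congrArg List.sum (List.map_congr_left ?_)
  intro j _
  by_cases hlt : (k : Int) < pvIdx A j
  · obtain ⟨h0, hN⟩ := pvIdx_bounds A j (k : Int) (by positivity) hlt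
    rw [if_pos hlt, if_pos hlt]
    have hcast : ((pvIdx A j).toNat : Int) = pvIdx A j := by omega
    rw [← hcast]
    exact pvPhi_plateau A (A.length - k - 1) (A.length - (pvIdx A j).toNat)
      ((pvIdx A j).toNat : Int) (by positivity) (by omega) (by omega) (by omega)
  · rw [if_neg hlt, if_neg hlt]

lemma pvS_step (A : List Int) (i : Nat) (hi : i < A.length) :
    pvS A i = pvF A i + pvS A (i + 1) := by
  unfold pvS
  rw [List.drop_eq_getElem_cons (by simpa using hi)]
  simp

-- A's inner while-loop is 1 plus the sum of the guarded reads over the submask list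
lemma pvInnerA_eq_sum (mask M i : Int) (T f : List Int) : ∀ (fuel : Nat) (cnt j : Int),
    pvInnerA mask M i T f fuel cnt j = cnt + ((pvSubsGo mask fuel j).map (fun x =>
      if x ≤ M ∧ i < pvTGet T x then PySem.List.pyGetD f (pvTGet T x) 0 else 0)).sum := by
  intro fuel
  induction fuel with
  | zero => intro cnt j; simp [pvInnerA, pvSubsGo]
  | succ n ih =>
    intro cnt j
    by_cases hj : 0 < j
    · rw [pvInnerA, if_pos hj, pvSubsGo, if_pos hj, ih]
      simp only [pvTGet, List.map_cons, List.sum_cons]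
      by_cases h1 : j ≤ M <;> by_cases h2 : i < PySem.List.pyGetD T j (-1) <;>
        (simp [h1, h2]; try ring)
    · rw [pvInnerA, if_neg hj, pvSubsGo, if_neg hj]
      simp

-- the invariant of A's outer right-to-left loop once positions ≥ i are processed
def pvINV (A : List Int) (i : Nat) (st : List Int × Int) : Prop :=
  st.1.length = A.length ∧
    (∀ k : Nat, i ≤ k → k < A.length → PySem.List.pyGetD st.1 (k : Int) 0 = pvF A k) ∧
    st.2 = pvS A i

-- one step of A's loop preserves the invariant
lemma pvStepA_inv (A : List Int) (M : Int) (hall : ∀ v ∈ A, 0 ≤ v ∧ v ≤ M)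
    (i : Nat) (hi : i < A.length) (st : List Int × Int) (h : pvINV A (i + 1) st) :
    pvINV A i (pvStepA A M (pvBuildT A M) st (i : Int)) := by
  obtain ⟨hlen, hent, hsum⟩ := h
  simp only [pvStepA]
  set mask := PySem.List.pyGetD A (i : Int) 0 with hmdef
  set j0 := PySem.Int.band mask (mask - 1) with hj0
  have hcnt : pvInnerA mask M (i : Int) (pvBuildT A M) st.1 (j0.toNat + 1) 1 j0 = pvF A i := by
    rw [pvInnerA_eq_sum]
    have hsubs : pvSubsGo mask (j0.toNat + 1) j0 = pvSubmasks mask := rfl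
    rw [hsubs]
    rw [pvF_rec A i hi, ← hmdef]
    congr 1
    refine congrArg List.sum (List.map_congr_left ?_)
    intro x hx
    have hx0 : 0 < x := pvSubsGo_pos mask _ _ _ hx
    by_cases hxM : x ≤ M
    · rw [pvT_agree M A hall x (le_of_lt hx0) hxM]
      by_cases hlt : (i : Int) < pvIdx A x
      · obtain ⟨h0, hN⟩ := pvIdx_bounds A x (i : Int) (by positivity) hlt
        rw [if_pos ⟨hxM, hlt⟩, if_pos hlt]
        have hcast : ((pvIdx A x).toNat : Int) = pvIdx A x := by omega
        rw [← hcast, hent (pvIdx A x).toNat (by omega) (by omega), Int.toNat_natCast]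
      · rw [if_neg (fun hc => hlt hc.2), if_neg hlt]
    · rw [pvIdx_of_gt_max A M x hall hxM,
        if_neg (fun hc => hxM hc.1), if_neg (by omega)]
  rw [hcnt]
  refine ⟨by simp [PySem.List.pySetD_natCast, hlen], fun k hk1 hk2 => ?_, ?_⟩
  · rw [PySem.List.pySetD_natCast]
    by_cases hk : k = i
    · subst hk
      rw [PySem.List.pyGetD_natCast, List.getD_eq_getElem?_getD,
        List.getElem?_set_self (by omega)]
      rfl
    · rw [PySem.List.pyGetD_natCast, List.getD_eq_getElem?_getD,
        List.getElem?_set_ne (by omega), ← List.getD_eq_getElem?_getD,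
        ← PySem.List.pyGetD_natCast]
      exact hent k (by omega) hk2
  · show st.2 + pvF A i = pvS A i
    rw [hsum, pvS_step A i hi]
    ring

-- running A's loop down from position i preserves the invariant to 0
lemma pvFoldA_inv (A : List Int) (M : Int) (hall : ∀ v ∈ A, 0 ≤ v ∧ v ≤ M) :
    ∀ (i : Nat), i ≤ A.length → ∀ st, pvINV A i st →
      pvINV A 0 (((List.range i).reverse.map Nat.cast).foldl
        (pvStepA A M (pvBuildT A M)) st) := by
  intro i
  induction i with
  | zero => intro _ st h; simpa using h
  | succ i ih =>
    intro hle st h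
    rw [List.range_succ, List.reverse_append]
    simp only [List.reverse_cons, List.reverse_nil, List.nil_append]
    exact ih (by omega) _ (pvStepA_inv A M hall i (by omega) st h)

-- `range(N-1, -1, -1)` is the descending list of the first N naturals
lemma pvRange_countdown (n : Nat) :
    PySem.List.pyRange ((n : Int) - 1) (-1) (-1)
      = (List.range n).reverse.map Nat.cast := by
  induction n with
  | zero => simp [PySem.List.pyRange_neg_one_eq_nil]
  | succ n ih =>
    have h1 : ((n + 1 : Nat) : Int) - 1 = (n : Int) := by push_cast; omega
    rw [PySem.List.pyRange_neg_one_cons (by push_cast; omega), h1, ih]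
    simp [List.range_succ]

-- B's memoized recursion returns pvF and preserves the memo invariant
lemma pvFB_spec (A : List Int) : ∀ (fuel : Nat) (i : Int) (memo : PySem.Dict Int Int),
    0 ≤ i → i < (A.length : Int) → (A.length : Int) - i ≤ fuel → pvMemoInv A memo →
    (pvFB A (pvBuildTD A) fuel memo i).2 = pvF A i.toNat ∧
      pvMemoInv A (pvFB A (pvBuildTD A) fuel memo i).1 := by
  intro fuel
  induction fuel with
  | zero => intro i memo h0 h1 h2 _; omega
  | succ n ih =>
    intro i memo hi0 hiN hfuel hinv
    rw [pvFB]
    cases hg : memo.get? i with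
    | some c =>
      obtain ⟨_, _, hc⟩ := hinv i c hg
      exact ⟨hc.symm ▸ rfl, hinv⟩
    | none =>
      -- the foldl over the submask list
      have hfold : ∀ (l : List Int) (memo' : PySem.Dict Int Int) (t : Int),
          pvMemoInv A memo' →
          ((l.foldl (fun (st : PySem.Dict Int Int × Int) j =>
              if i < (pvBuildTD A).getD j (-1) then
                ((pvFB A (pvBuildTD A) n st.1 ((pvBuildTD A).getD j (-1))).1,
                  st.2 + (pvFB A (pvBuildTD A) n st.1 ((pvBuildTD A).getD j (-1))).2)
              else st) (memo', t)).2
            = t + (l.map (fun j => if i < pvIdx A j then pvF A (pvIdx A j).toNat else 0)).sum)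
          ∧ pvMemoInv A ((l.foldl (fun (st : PySem.Dict Int Int × Int) j =>
              if i < (pvBuildTD A).getD j (-1) then
                ((pvFB A (pvBuildTD A) n st.1 ((pvBuildTD A).getD j (-1))).1,
                  st.2 + (pvFB A (pvBuildTD A) n st.1 ((pvBuildTD A).getD j (-1))).2)
              else st) (memo', t)).1) := by
        intro l
        induction l with
        | nil => intro memo' t hinv'; exact ⟨by simp, hinv'⟩
        | cons j l ihl =>
          intro memo' t hinv'
          simp only [List.foldl_cons, List.map_cons, List.sum_cons]
          by_cases hlt : i < (pvBuildTD A).getD j (-1)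
          · have hlt' : i < pvIdx A j := hlt
            obtain ⟨h0, hN⟩ := pvIdx_bounds A j i hi0 hlt'
            obtain ⟨hval, hinv''⟩ := ih (pvIdx A j) memo' h0 hN (by omega) hinv'
            rw [if_pos hlt]
            obtain ⟨hv2, hi2⟩ := ihl (pvFB A (pvBuildTD A) n memo' ((pvBuildTD A).getD j (-1))).1
              (t + (pvFB A (pvBuildTD A) n memo' ((pvBuildTD A).getD j (-1))).2) hinv''
            refine ⟨?_, hi2⟩
            rw [hv2]
            have hval' : (pvFB A (pvBuildTD A) n memo' ((pvBuildTD A).getD j (-1))).2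
                = pvF A (pvIdx A j).toNat := hval
            rw [hval', if_pos hlt']
            ring
          · rw [if_neg hlt, if_neg (show ¬ i < pvIdx A j from hlt)]
            obtain ⟨hv2, hi2⟩ := ihl memo' t hinv'
            rw [hv2]
            exact ⟨by ring, hi2⟩
      obtain ⟨hv, hinv'⟩ := hfold (pvSubmasks (PySem.List.pyGetD A i 0)) memo 1 hinv
      have hrec := pvF_rec A i.toNat (by omega)
      rw [show ((i.toNat : Nat) : Int) = i from by omega] at hrec
      constructor
      · rw [hv, hrec]
      · intro k c hkc
        rw [PySem.Dict.get?_insert] at hkc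
        by_cases hki : k = i
        · rw [if_pos hki] at hkc
          obtain rfl : _ = c := by injection hkc
          exact ⟨hki ▸ hi0, hki ▸ hiN, by rw [hki, hv, hrec]⟩
        · rw [if_neg hki] at hkc
          exact hinv' k c hkc

-- B's top-level sum over the positions, threading the memo
lemma pvTopB (A : List Int) : ∀ (l : List Int) (memo : PySem.Dict Int Int) (t : Int),
    (∀ i ∈ l, 0 ≤ i ∧ i < (A.length : Int)) → pvMemoInv A memo →
    (l.foldl
      (fun (st : PySem.Dict Int Int × Int) i =>
        ((pvFB A (pvBuildTD A) A.length st.1 i).1,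
          st.2 + (pvFB A (pvBuildTD A) A.length st.1 i).2)) (memo, t)).2
      = t + (l.map (fun i => pvF A i.toNat)).sum := by
  intro l
  induction l with
  | nil => intro memo t _ _; simp
  | cons k l ihl =>
    intro memo t hk hinv
    simp only [List.foldl_cons, List.map_cons, List.sum_cons]
    obtain ⟨hk0, hkN⟩ := hk k (List.mem_cons_self ..)
    obtain ⟨hval, hinv'⟩ := pvFB_spec A A.length k memo hk0 hkN (by omega) hinv
    rw [ihl _ _ (fun x hx => hk x (List.mem_cons_of_mem _ hx)) hinv', hval]
    ring

-- `range(0, N, 1)` is the ascending list of the first N naturals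
lemma pvRange_up (n : Nat) :
    PySem.List.pyRange 0 (n : Int) 1 = (List.range n).map Nat.cast := by
  rw [PySem.List.pyRange_one]
  have h1 : ((n : Int) - 0).toNat = n := by omega
  rw [h1]
  apply List.map_congr_left
  intro k _
  simp

-- ===== VERDICT (by name: the statement is the Claim_ definition above) =====
theorem compute_reference_answer_py_spec : Claim_equal_compute_reference_answer_py := by
  intro A _ hpre
  obtain ⟨hne, hpos⟩ := hpre
  unfold Spec_compute_reference_answer_py
  unfold compute_reference_answer_py compute_reference_answer_py_alt
  cases hmax : PySem.List.max? A (fun x => x) with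
  | none => exact absurd ((PySem.List.max?_eq_none_iff A _).1 hmax) hne
  | some M =>
    have hall : ∀ v ∈ A, 0 ≤ v ∧ v ≤ M := fun v hv =>
      ⟨hpos v hv, PySem.List.max?_isMax hmax v hv⟩
    simp only [PySem.List.len_eq]
    rw [pvRange_countdown A.length]
    have hA := pvFoldA_inv A M hall A.length le_rfl (List.replicate A.length 0, 0)
      ⟨by simp, fun k hk1 hk2 => by omega, by simp [pvS, List.drop_eq_nil_of_le]⟩
    have hB := pvTopB A (PySem.List.pyRange 0 ((A.length : Nat) : Int) 1) PySem.Dict.empty 0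
      (fun i hi => by rw [PySem.List.mem_pyRange_one] at hi; exact ⟨hi.1, hi.2⟩)
      (fun k c h => by rw [PySem.Dict.get?_empty] at h; cases h)
    rw [hA.2.2, hB]
    have hms : ((PySem.List.pyRange 0 ((A.length : Nat) : Int) 1).map (fun i => pvF A i.toNat)).sum
        = pvS A 0 := by
      rw [pvRange_up, List.map_map]
      unfold pvS
      rw [List.drop_zero]
      exact congrArg List.sum (List.map_congr_left (fun k _ => by simp))
    omega
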